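-- pv_equiv track=rewrite | github.com/Melodiz/CodeRun | ML/Medium/156_typos/solution.py | apply_typo_end
-- ===== SOURCE A (Python) =====
-- def apply_typo_end(word, typo):
--     result = set()
--     result.add(word)
--     start_index = word.find(typo[1])
--     while start_index != -1:
--         result.add(word[:start_index]+typo[0]+word[start_index+len(typo[1]):])
--         start_index = word.find(typo[1], start_index+1)
--     if not result:
--         return word
--     return result
-- ===== SOURCE B (Python) =====
-- def apply_typo_end(word, typo):
--     # Hash-index algorithm: one pass builds a dictionary mapping every
--     # length-m window of word to the (increasing) list of its start positions;
--     # a single dict lookup then replaces A's repeated str.find scan.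
--     rep, sub = typo[0], typo[1]
--     m = len(sub)
--     index = {}
--     for i in range(len(word) - m + 1):
--         index.setdefault(word[i:i + m], []).append(i)
--     result = {word}
--     for s in index.get(sub, []):
--         result.add(word[:s] + rep + word[s + m:])
--     return result
-- ===== Notes on version B (the rewrite author's own statement) =====
-- stated objective: alternative
-- what changed: Replaced A's find-driven while loop (repeated str.find with a moving start index) by a hash index: one pass builds a dict mapping every length-m window of word to its ordered start-position list, then a single dict lookup of typo[1] yields all (overlapping) match positions and the variants are built from them.
import Mathlib
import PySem

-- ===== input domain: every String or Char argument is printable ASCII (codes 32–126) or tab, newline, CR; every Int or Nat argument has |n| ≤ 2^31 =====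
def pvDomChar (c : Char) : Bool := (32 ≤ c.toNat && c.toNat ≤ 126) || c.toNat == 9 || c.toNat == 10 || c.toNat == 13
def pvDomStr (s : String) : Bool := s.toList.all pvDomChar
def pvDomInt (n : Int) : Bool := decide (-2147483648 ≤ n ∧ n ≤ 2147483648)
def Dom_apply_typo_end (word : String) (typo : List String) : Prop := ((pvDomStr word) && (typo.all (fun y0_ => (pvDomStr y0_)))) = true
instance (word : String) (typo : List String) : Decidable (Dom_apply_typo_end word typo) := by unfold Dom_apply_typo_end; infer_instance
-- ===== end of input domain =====

-- B replaces A's find-driven while loop by a hash index: one pass builds a dict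
-- mapping every length-m window to its start positions; one lookup replaces the scan.

-- ===== PORT A =====
-- A's 'while start_index != -1' loop; fuel (length word + 1) bounds the number of
-- iterations, which the Python loop never exceeds (find's start index strictly grows).
def applyTypoLoopA (w sub rep : List Char) (fuel : Nat) (acc : PySem.Set String) (idx : Int) : PySem.Set String :=
  match fuel with
  | 0 => acc
  | fuel' + 1 =>
    if idx = -1 then acc
    else
      applyTypoLoopA w sub rep fuel'
        (PySem.Set.add acc (String.ofList (PySem.List.slice w none (some idx) ++ rep ++
          PySem.List.slice w (some (idx + (sub.length : Int))) none)))
        (PySem.Chars.findFrom w sub (idx + 1) none)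

def apply_typo_end (word : String) (typo : List String) : List String :=
  match PySem.List.pyGet? typo 1, PySem.List.pyGet? typo 0 with
  | some t1, some t0 =>
    let w := word.toList
    let result : PySem.Set String := PySem.Set.add ([] : PySem.Set String) word
    let r := applyTypoLoopA w t1.toList t0.toList (w.length + 1) result (PySem.Chars.find w t1.toList)
    if r.isEmpty then [word] else r      -- 'if not result: return word' (unreachable)
  | _, _ => []                           -- typo[0]/typo[1] raises IndexError: outside Pre_

-- ===== PORT B =====
-- word[i:i+m] for a Nat index i: Python's slice = (drop i).take m (exact for 0 <= i).
def windowB (w : List Char) (m i : Nat) : String := String.ofList ((w.drop i).take m)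

-- 'for i in range(len(word)-m+1): index.setdefault(word[i:i+m], []).append(i)'
-- (Nat subtraction length+1-m = Python's empty range when len(word)-m+1 <= 0).
def buildIndexB (w : List Char) (m : Nat) : PySem.Dict String (List Int) :=
  (List.range (w.length + 1 - m)).foldl
    (fun d i => d.insert (windowB w m i) (d.getD (windowB w m i) [] ++ [Int.ofNat i]))
    PySem.Dict.empty

def apply_typo_end_alt (word : String) (typo : List String) : List String :=
  match PySem.List.pyGet? typo 0 with
  | none => []
  | some t0 =>
    match PySem.List.pyGet? typo 1 with
    | none => []
    | some t1 =>
      let w := word.toList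
      let m := t1.toList.length
      let idx := buildIndexB w m
      (idx.getD t1 []).foldl
        (fun acc s => PySem.Set.add acc (String.ofList
          (PySem.List.slice w none (some s) ++ t0.toList ++
            PySem.List.slice w (some (s + (m : Int))) none)))
        (PySem.Set.add ([] : PySem.Set String) word)

-- ===== PRECONDITION & SPEC =====
-- A raises IndexError (typo[1] or typo[0]) when typo has fewer than two elements.
def Pre_apply_typo_end (word : String) (typo : List String) : Prop := 2 ≤ typo.length
instance (word : String) (typo : List String) : Decidable (Pre_apply_typo_end word typo) := by unfold Pre_apply_typo_end; infer_instance
def pvWitness_apply_typo_end : String × List String := ("hello", ["l", "ll"])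

def Spec_apply_typo_end (word : String) (typo : List String) (out : List String) : Prop := out = apply_typo_end_alt word typo
instance (word : String) (typo : List String) (out : List String) : Decidable (Spec_apply_typo_end word typo out) := by unfold Spec_apply_typo_end; infer_instance

-- ===== CLAIM (what is proved, stated in full; the proofs are below) =====
def Claim_equal_apply_typo_end : Prop := ∀ (word : String) (typo : List String), Dom_apply_typo_end word typo → Pre_apply_typo_end word typo → Spec_apply_typo_end word typo (apply_typo_end word typo)

-- ===== LEMMAS AND PROOFS =====

lemma findFrom_past (s sub : List Char) (m : Nat) (h : s.length < m) :
    PySem.Chars.findFrom s sub (m : Int) none = -1 := by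
  simp only [PySem.Chars.findFrom]
  rw [if_neg (by omega : ¬((m:Int) < 0)), if_pos (by exact_mod_cast h)]

lemma findFrom_of_prefix (s sub : List Char) (k : Nat) (hk : k ≤ s.length)
    (h : sub <+: s.drop k) : PySem.Chars.findFrom s sub (k : Int) none = (k : Int) := by
  have hne : PySem.Chars.findFrom s sub (k : Int) none ≠ -1 := by
    rw [ne_eq, PySem.Chars.findFrom_natCast_eq_neg_one_iff s sub k hk]
    simp only [not_not]
    exact h.isInfix
  obtain ⟨h1, h2, h3⟩ := PySem.Chars.findFrom_natCast_spec s sub k hk hne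
  set j := PySem.Chars.findFrom s sub (k : Int) none with hj
  have hk' : k ≤ j.toNat := by omega
  rcases Nat.lt_or_ge k j.toNat with hlt | hge
  · exact absurd h (h3 k le_rfl hlt)
  · omega

lemma findFrom_skip (s sub : List Char) (k : Nat) (hk : k ≤ s.length)
    (h : ¬ sub <+: s.drop k) :
    PySem.Chars.findFrom s sub (k : Int) none = PySem.Chars.findFrom s sub ((k + 1 : Nat) : Int) none := by
  rcases Nat.lt_or_ge k s.length with hlt | hge
  · -- k < length: compare first matches ≥ k and ≥ k+1
    have hk1 : k + 1 ≤ s.length := hlt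
    by_cases hinf : sub <:+: s.drop k
    · have hne : PySem.Chars.findFrom s sub (k : Int) none ≠ -1 := by
        rw [ne_eq, PySem.Chars.findFrom_natCast_eq_neg_one_iff s sub k hk]; simpa
      obtain ⟨h1, h2, h3⟩ := PySem.Chars.findFrom_natCast_spec s sub k hk hne
      set j := PySem.Chars.findFrom s sub (k : Int) none with hj
      have hjk : k + 1 ≤ j.toNat := by
        rcases Nat.lt_or_ge k j.toNat with hl | hg
        · omega
        · have : j.toNat = k := by omega
          rw [this] at h2; exact absurd h2 h
      have hinf1 : sub <:+: s.drop (k+1) := by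
        have : sub <+: List.drop (j.toNat - (k+1)) (s.drop (k+1)) := by
          rw [List.drop_drop]
          have : k + 1 + (j.toNat - (k+1)) = j.toNat := by omega
          rw [this]; exact h2
        exact this.isInfix.trans (List.drop_suffix _ _).isInfix
      have hne1 : PySem.Chars.findFrom s sub ((k+1 : Nat) : Int) none ≠ -1 := by
        rw [ne_eq, PySem.Chars.findFrom_natCast_eq_neg_one_iff s sub (k+1) hk1]; simpa
      obtain ⟨h1', h2', h3'⟩ := PySem.Chars.findFrom_natCast_spec s sub (k+1) hk1 hne1
      set j' := PySem.Chars.findFrom s sub ((k+1 : Nat) : Int) none with hj'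
      have e1 : ¬ j'.toNat < j.toNat := fun hc => (h3 j'.toNat (by omega) hc) h2'
      have e2 : ¬ j.toNat < j'.toNat := fun hc => (h3' j.toNat (by omega) hc) h2
      omega
    · have e1 : PySem.Chars.findFrom s sub (k : Int) none = -1 := by
        rw [PySem.Chars.findFrom_natCast_eq_neg_one_iff s sub k hk]; exact hinf
      have e2 : PySem.Chars.findFrom s sub ((k+1 : Nat) : Int) none = -1 := by
        rw [PySem.Chars.findFrom_natCast_eq_neg_one_iff s sub (k+1) hk1]
        intro hc
        exact hinf (hc.trans (by simpa [List.drop_drop] using (List.drop_suffix 1 (s.drop k)).isInfix))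
      rw [e1, e2]
  · -- k = length: both are -1
    have hkl : k = s.length := by omega
    have e1 : PySem.Chars.findFrom s sub (k : Int) none = -1 := by
      rw [PySem.Chars.findFrom_natCast_eq_neg_one_iff s sub k hk]
      subst hkl
      simp only [List.drop_length, List.infix_nil]
      intro hc; subst hc; exact h (List.nil_prefix)
    rw [e1, findFrom_past s sub (k+1) (by omega)]

lemma cand_eq (w rep sub : List Char) (k : Nat) :
    PySem.List.slice w none (some (k : Int)) ++ rep ++
      PySem.List.slice w (some ((k : Int) + (sub.length : Int))) none
    = w.take k ++ rep ++ w.drop (k + sub.length) := by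
  have h1 : ((k : Int) + (sub.length : Int)) = ((k + sub.length : Nat) : Int) := by push_cast; ring
  rw [PySem.List.slice_to_natCast, h1, PySem.List.slice_from_natCast]

-- A's while loop equals a left-to-right fold over the gap positions k … length.
lemma loop_eq (w sub rep : List Char) : ∀ (n k : Nat), k + n = w.length + 1 →
    ∀ (acc : PySem.Set String) (fuel : Nat), n ≤ fuel →
    applyTypoLoopA w sub rep fuel acc (PySem.Chars.findFrom w sub (k : Int) none)
    = (List.range' k n).foldl
        (fun acc i =>
          if PySem.Chars.startswith (w.drop i) sub then
            PySem.Set.add acc (String.ofList (w.take i ++ rep ++ w.drop (i + sub.length)))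
          else acc) acc := by
  intro n
  induction n with
  | zero =>
    intro k hk acc fuel hf
    rw [findFrom_past w sub k (by omega)]
    cases fuel <;> simp [applyTypoLoopA, List.range']
  | succ n ih =>
    intro k hk acc fuel hf
    have hk' : k ≤ w.length := by omega
    rw [List.range'_succ]
    by_cases hpre : sub <+: w.drop k
    · rw [findFrom_of_prefix w sub k hk' hpre]
      obtain ⟨fuel', rfl⟩ : ∃ f', fuel = f' + 1 := ⟨fuel - 1, by omega⟩
      simp only [applyTypoLoopA]
      rw [if_neg (by omega : ¬((k : Int) = -1))]
      have hc : ((k : Int) + 1) = ((k + 1 : Nat) : Int) := by push_cast; ring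
      rw [hc, cand_eq]
      rw [ih (k+1) (by omega) _ fuel' (by omega)]
      simp only [List.foldl_cons]
      have hsw : PySem.Chars.startswith (w.drop k) sub = true := by
        simp [PySem.Chars.startswith, List.isPrefixOf_iff_prefix, hpre]
      rw [if_pos hsw]
    · rw [findFrom_skip w sub k hk' hpre]
      rw [ih (k+1) (by omega) acc fuel (by omega)]
      simp only [List.foldl_cons]
      have hsw : ¬ (PySem.Chars.startswith (w.drop k) sub = true) := by
        simp [PySem.Chars.startswith, List.isPrefixOf_iff_prefix, hpre]
      rw [if_neg hsw]

lemma loop_ne_nil (w sub rep : List Char) :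
    ∀ (fuel : Nat) (idx : Int) (acc : PySem.Set String), acc ≠ [] →
    applyTypoLoopA w sub rep fuel acc idx ≠ [] := by
  intro fuel
  induction fuel with
  | zero => intro idx acc h; simpa [applyTypoLoopA] using h
  | succ f ih =>
    intro idx acc h
    simp only [applyTypoLoopA]
    split
    · exact h
    · apply ih
      simp only [PySem.Set.add]
      split
      · exact h
      · simp

-- The setdefault-append loop: the value stored under k is the ordered list of the
-- mapped indices whose key is k.
lemma getD_build {κ ν : Type} [BEq κ] [LawfulBEq κ] [DecidableEq κ] (f : Nat → κ) (g : Nat → ν) :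
    ∀ (l : List Nat) (d : PySem.Dict κ (List ν)) (k : κ),
    (l.foldl (fun d i => d.insert (f i) (d.getD (f i) [] ++ [g i])) d).getD k []
    = d.getD k [] ++ (l.filter (fun i => f i == k)).map g := by
  intro l
  induction l with
  | nil => intro d k; simp
  | cons x xs ih =>
    intro d k
    simp only [List.foldl_cons, List.filter_cons, ih]
    by_cases h : f x = k
    · subst h
      rw [PySem.Dict.getD_insert]
      simp
    · rw [PySem.Dict.getD_insert, if_neg (by exact fun hc => h hc.symm)]
      simp [h]

-- window equality at i  =  sub is a prefix of word[i:]
lemma windowB_key (w sub : List Char) (i : Nat) :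
    (windowB w sub.length i == String.ofList sub)
    = PySem.Chars.startswith (w.drop i) sub := by
  have h : (windowB w sub.length i == String.ofList sub) = true
      ↔ PySem.Chars.startswith (w.drop i) sub = true := by
    rw [beq_iff_eq, PySem.Chars.startswith_iff]
    constructor
    · intro h
      have h2 : (w.drop i).take sub.length = sub := by
        have := congrArg String.toList h
        simpa [windowB] using this
      rw [List.prefix_iff_eq_take]
      exact h2.symm
    · intro h
      have h2 : sub = (w.drop i).take sub.length := List.prefix_iff_eq_take.mp h
      simp [windowB, ← h2]
  rcases Bool.eq_false_or_eq_true (PySem.Chars.startswith (w.drop i) sub) with h1 | h1 <;>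
    rcases Bool.eq_false_or_eq_true (windowB w sub.length i == String.ofList sub) with h2 | h2 <;>
    simp_all

-- positions past length-m never match, so the shorter index range loses nothing
lemma filter_range_window (w sub : List Char) :
    (List.range (w.length + 1)).filter (fun i => PySem.Chars.startswith (w.drop i) sub)
    = (List.range (w.length + 1 - sub.length)).filter
        (fun i => PySem.Chars.startswith (w.drop i) sub) := by
  set n := w.length
  set m := sub.length with hm
  have hsplit : n + 1 = (n + 1 - m) + (n + 1 - (n + 1 - m)) := by omega
  conv_lhs => rw [hsplit, List.range_add, List.filter_append]
  have hnil : (List.map (fun j => (n + 1 - m) + j) (List.range (n + 1 - (n + 1 - m)))).filter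
      (fun i => PySem.Chars.startswith (w.drop i) sub) = [] := by
    rw [List.filter_eq_nil_iff]
    intro i hi
    simp only [List.mem_map, List.mem_range] at hi
    obtain ⟨j, hj, rfl⟩ := hi
    intro hc
    rw [PySem.Chars.startswith_iff] at hc
    have hlen := hc.length_le
    rw [List.length_drop] at hlen
    omega
  rw [hnil, List.append_nil]

-- Folding a conditional add over positions = folding add over the filtered, mapped list.
lemma foldl_cond_add (P : Nat → Bool) (g : Nat → String) :
    ∀ (l : List Nat) (acc : PySem.Set String),
    l.foldl (fun acc i => if P i then PySem.Set.add acc (g i) else acc) acc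
    = ((l.filter P).map g).foldl PySem.Set.add acc := by
  intro l
  induction l with
  | nil => intro acc; rfl
  | cons x xs ih =>
    intro acc
    simp only [List.foldl_cons, List.filter_cons]
    by_cases h : P x = true
    · rw [if_pos h, if_pos h]; simp only [List.map_cons, List.foldl_cons]; exact ih _
    · rw [if_neg h, if_neg h]; exact ih _

theorem apply_typo_end_eq_alt (word : String) (typo : List String) (hpre : 2 ≤ typo.length) :
    apply_typo_end word typo = apply_typo_end_alt word typo := by
  match typo with
  | [] => simp at hpre
  | [a] => simp at hpre
  | a :: b :: r =>
    have hg0 : PySem.List.pyGet? (a :: b :: r) 0 = some a := by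
      have h0 : (0:Int) ≤ (r.length:Int) + 1 := by positivity
      simp [PySem.List.pyGet?, PySem.List.pyIdx?, h0]
    have hg1 : PySem.List.pyGet? (a :: b :: r) 1 = some b := by
      simp [PySem.List.pyGet?, PySem.List.pyIdx?]
    unfold apply_typo_end apply_typo_end_alt
    rw [hg0, hg1]
    simp only []
    set w := word.toList with hw
    have hstart : PySem.Set.add ([] : PySem.Set String) word = [word] := by
      simp [PySem.Set.add]
    have hfind : PySem.Chars.find w b.toList = PySem.Chars.findFrom w b.toList ((0 : Nat) : Int) none := by
      rw [(by norm_num : ((0 : Nat) : Int) = (0 : Int)), PySem.Chars.findFrom_zero]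
    rw [hstart, hfind, loop_eq w b.toList a.toList (w.length + 1) 0 (by omega) [word] (w.length + 1) le_rfl]
    rw [← List.range_eq_range']
    have hB : (((buildIndexB w b.toList.length).getD b []).foldl
          (fun acc s => PySem.Set.add acc (String.ofList
            (PySem.List.slice w none (some s) ++ a.toList ++
              PySem.List.slice w (some (s + (b.toList.length : Int))) none))) [word])
        = (List.range (w.length + 1)).foldl
            (fun acc i =>
              if PySem.Chars.startswith (w.drop i) b.toList then
                PySem.Set.add acc (String.ofList (w.take i ++ a.toList ++ w.drop (i + b.toList.length)))
              else acc) [word] := by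
      have hidx : (buildIndexB w b.toList.length).getD b []
          = ((List.range (w.length + 1 - b.toList.length)).filter
              (fun i => PySem.Chars.startswith (w.drop i) b.toList)).map (fun i => Int.ofNat i) := by
        rw [buildIndexB, getD_build (fun i => windowB w b.toList.length i) (fun i => Int.ofNat i)]
        have hb : String.ofList b.toList = b := by
          simp
        have hfcongr : (List.range (w.length + 1 - b.toList.length)).filter
              (fun i => windowB w b.toList.length i == b)
            = (List.range (w.length + 1 - b.toList.length)).filter
              (fun i => PySem.Chars.startswith (w.drop i) b.toList) := by
          apply List.filter_congr
          intro i _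
          rw [show (windowB w b.toList.length i == b)
                = (windowB w b.toList.length i == String.ofList b.toList) from by rw [hb],
            windowB_key]
        rw [hfcongr]
        rfl
      rw [hidx, ← filter_range_window, List.foldl_map,
        foldl_cond_add (fun i => PySem.Chars.startswith (w.drop i) b.toList)
          (fun i => String.ofList (w.take i ++ a.toList ++ w.drop (i + b.toList.length))),
        List.foldl_map]
      have hfun : (fun (acc : PySem.Set String) (i : Nat) => PySem.Set.add acc (String.ofList
            (PySem.List.slice w none (some (Int.ofNat i)) ++ a.toList ++
              PySem.List.slice w (some ((Int.ofNat i) + (b.toList.length : Int))) none)))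
          = (fun (acc : PySem.Set String) (i : Nat) => PySem.Set.add acc
              (String.ofList (w.take i ++ a.toList ++ w.drop (i + b.toList.length)))) := by
        funext acc i
        rw [show Int.ofNat i = ((i : Nat) : Int) from rfl, cand_eq]
      rw [hfun]
    rw [← hB]
    have hne : (((buildIndexB w b.toList.length).getD b []).foldl
          (fun acc s => PySem.Set.add acc (String.ofList
            (PySem.List.slice w none (some s) ++ a.toList ++
              PySem.List.slice w (some (s + (b.toList.length : Int))) none))) [word]) ≠ [] := by
      rw [hB, List.range_eq_range', ← loop_eq w b.toList a.toList (w.length + 1) 0 (by omega) [word] (w.length + 1) le_rfl]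
      exact loop_ne_nil _ _ _ _ _ _ (by simp)
    rw [if_neg (by simpa [List.isEmpty_iff] using hne)]

-- ===== VERDICT (by name: the statement is the Claim_ definition above) =====
theorem apply_typo_end_spec : Claim_equal_apply_typo_end := by
  intro word typo _ hpre
  unfold Spec_apply_typo_end
  exact apply_typo_end_eq_alt word typo hpre
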